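-- pv_equiv track=rewrite | github.com/mikegorlin/OpenUnderwriter | scripts/dead_code_scan.py | categorize_findings
-- ===== SOURCE A (Python) =====
-- def categorize_findings(raw_output: str) -> dict[str, list[str]]:
--     """Parse vulture output into categories."""
--     categories: dict[str, list[str]] = {
--         "unused_import": [],
--         "unused_function": [],
--         "unused_variable": [],
--         "unused_class": [],
--         "unused_attribute": [],
--         "unused_property": [],
--         "other": [],
--     }
--
--     for line in raw_output.strip().splitlines():
--         if not line.strip():
--             continue
--
--         lower = line.lower()
--         if "unused import" in lower:
--             categories["unused_import"].append(line)
--         elif "unused function" in lower: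
--             categories["unused_function"].append(line)
--         elif "unused variable" in lower:
--             categories["unused_variable"].append(line)
--         elif "unused class" in lower:
--             categories["unused_class"].append(line)
--         elif "unused attribute" in lower:
--             categories["unused_attribute"].append(line)
--         elif "unused property" in lower:
--             categories["unused_property"].append(line)
--         else:
--             categories["other"].append(line)
--
--     return categories
-- ===== SOURCE B (Python) =====
-- RULES = [
--     ("unused import", "unused_import"),
--     ("unused function", "unused_function"),
--     ("unused variable", "unused_variable"),
--     ("unused class", "unused_class"),
--     ("unused attribute", "unused_attribute"),
--     ("unused property", "unused_property"),
-- ]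
--
--
-- def categorize_findings(raw_output: str) -> dict[str, list[str]]:
--     """Parse vulture output by sieving: each rule, in order, takes its matching
--     lines out of the remaining pool; whatever survives all rules is 'other'."""
--     remaining = [ln for ln in raw_output.strip().splitlines() if ln.strip()]
--     categories: dict[str, list[str]] = {}
--     for sub, key in RULES:
--         categories[key] = [ln for ln in remaining if sub in ln.lower()]
--         remaining = [ln for ln in remaining if sub not in ln.lower()]
--     categories["other"] = remaining
--     return categories
-- ===== Notes on version B (the rewrite author's own statement) =====
-- stated objective: alternative
-- what changed: Replaces A's line-major if/elif classification into a mutable dict by a rule-major sieve: each rule, in order, filters its matching lines out of a shrinking remaining pool, and the lines surviving all six rules form the fallback category.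
import Mathlib
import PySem

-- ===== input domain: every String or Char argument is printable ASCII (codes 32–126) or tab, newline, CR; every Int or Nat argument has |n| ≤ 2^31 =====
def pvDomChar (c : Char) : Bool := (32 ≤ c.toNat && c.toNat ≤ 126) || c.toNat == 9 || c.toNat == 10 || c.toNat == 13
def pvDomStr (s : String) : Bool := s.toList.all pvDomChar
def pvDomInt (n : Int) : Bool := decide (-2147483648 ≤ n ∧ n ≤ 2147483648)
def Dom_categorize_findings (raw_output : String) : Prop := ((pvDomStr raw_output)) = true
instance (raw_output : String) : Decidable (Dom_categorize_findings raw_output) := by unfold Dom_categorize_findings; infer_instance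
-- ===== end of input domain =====

-- B replaces A's line-major if/elif dispatch into a mutable dict by a rule-major
-- sieve: each rule in order takes its matches out of a shrinking pool; survivors form the fallback category.

-- ===== PORT A =====
-- the initial dict with the seven empty categories
def pvInitDict : PySem.Dict String (List String) :=
  PySem.Dict.ofList [("unused_import", []), ("unused_function", []), ("unused_variable", []),
    ("unused_class", []), ("unused_attribute", []), ("unused_property", []), ("other", [])]

-- one iteration of A's for-loop (the 'continue' and the if/elif chain)
def pvStepA (d : PySem.Dict String (List String)) (line : String) :
    PySem.Dict String (List String) :=
  if PySem.Str.strip line == "" then d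
  else
    let lower := PySem.Str.lower line
    if PySem.Str.isIn "unused import" lower then d.modify "unused_import" [] (· ++ [line])
    else if PySem.Str.isIn "unused function" lower then d.modify "unused_function" [] (· ++ [line])
    else if PySem.Str.isIn "unused variable" lower then d.modify "unused_variable" [] (· ++ [line])
    else if PySem.Str.isIn "unused class" lower then d.modify "unused_class" [] (· ++ [line])
    else if PySem.Str.isIn "unused attribute" lower then d.modify "unused_attribute" [] (· ++ [line])
    else if PySem.Str.isIn "unused property" lower then d.modify "unused_property" [] (· ++ [line])
    else d.modify "other" [] (· ++ [line])

def categorize_findings (raw_output : String) : List (String × List String) :=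
  ((PySem.Str.splitlines (PySem.Str.strip raw_output)).foldl pvStepA pvInitDict).items

-- ===== PORT B =====
def pvRules : List (String × String) :=
  [("unused import", "unused_import"), ("unused function", "unused_function"),
   ("unused variable", "unused_variable"), ("unused class", "unused_class"),
   ("unused attribute", "unused_attribute"), ("unused property", "unused_property")]

-- the sieve: (categories built so far, lines not yet claimed by any rule)
def pvSieve (acc : PySem.Dict String (List String) × List String) (rule : String × String) :
    PySem.Dict String (List String) × List String :=
  (acc.1.insert rule.2 (acc.2.filter (fun ln => PySem.Str.isIn rule.1 (PySem.Str.lower ln))),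
   acc.2.filter (fun ln => !(PySem.Str.isIn rule.1 (PySem.Str.lower ln))))

def categorize_findings_alt (raw_output : String) : List (String × List String) :=
  let remaining := (PySem.Str.splitlines (PySem.Str.strip raw_output)).filter
    (fun ln => !(PySem.Str.strip ln == ""))
  let res := pvRules.foldl pvSieve (PySem.Dict.empty, remaining)
  (res.1.insert "other" res.2).items

-- ===== PRECONDITION & SPEC =====
def Spec_categorize_findings (raw_output : String) (out : List (String × List String)) : Prop := out = categorize_findings_alt raw_output
instance (raw_output : String) (out : List (String × List String)) : Decidable (Spec_categorize_findings raw_output out) := by unfold Spec_categorize_findings; infer_instance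

-- ===== CLAIM (what is proved, stated in full; the proofs are below) =====
def Claim_equal_categorize_findings : Prop := ∀ (raw_output : String), Dom_categorize_findings raw_output → Spec_categorize_findings raw_output (categorize_findings raw_output)

-- ===== LEMMAS AND PROOFS =====

-- the key A's chain picks for a line (proof-only; neither port uses it)
def pvClassify (line : String) : String :=
  ((pvRules.find? (fun r => PySem.Str.isIn r.1 (PySem.Str.lower line))).map (·.2)).getD "other"

-- common normal form: for each of the seven keys, the non-blank lines A's chain sends there
def pvNorm (lines : List String) : List (String × List String) :=
  (pvRules.map (·.2) ++ ["other"]).map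
    (fun k => (k, lines.filter (fun ln => pvClassify ln == k)))

-- A's loop body on a non-blank line is 'append to the bucket pvClassify picks'
theorem pvStepA_eq (d : PySem.Dict String (List String)) (line : String) :
    pvStepA d line =
      if !(PySem.Str.strip line == "") then d.modify (pvClassify line) [] (· ++ [line]) else d := by
  simp only [pvStepA, pvClassify, pvRules, List.find?]
  by_cases h0 : PySem.Str.strip line == ""
  · simp only [h0, Bool.not_true, Bool.false_eq_true, if_false, if_true]
  · simp only [h0, Bool.not_false, Bool.false_eq_true, if_false, if_true]
    by_cases h1 : PySem.Str.isIn "unused import" (PySem.Str.lower line) <;>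
    by_cases h2 : PySem.Str.isIn "unused function" (PySem.Str.lower line) <;>
    by_cases h3 : PySem.Str.isIn "unused variable" (PySem.Str.lower line) <;>
    by_cases h4 : PySem.Str.isIn "unused class" (PySem.Str.lower line) <;>
    by_cases h5 : PySem.Str.isIn "unused attribute" (PySem.Str.lower line) <;>
    by_cases h6 : PySem.Str.isIn "unused property" (PySem.Str.lower line) <;>
      simp only [h1, h2, h3, h4, h5, h6, Bool.false_eq_true, if_false, if_true,
        Option.map_some, Option.map_none, Option.getD_some, Option.getD_none]

theorem pvClassify_mem (line : String) : pvClassify line ∈ pvInitDict.keys := by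
  simp only [pvClassify, pvRules, List.find?]
  by_cases h1 : PySem.Str.isIn "unused import" (PySem.Str.lower line) <;>
  by_cases h2 : PySem.Str.isIn "unused function" (PySem.Str.lower line) <;>
  by_cases h3 : PySem.Str.isIn "unused variable" (PySem.Str.lower line) <;>
  by_cases h4 : PySem.Str.isIn "unused class" (PySem.Str.lower line) <;>
  by_cases h5 : PySem.Str.isIn "unused attribute" (PySem.Str.lower line) <;>
  by_cases h6 : PySem.Str.isIn "unused property" (PySem.Str.lower line) <;>
    simp only [h1, h2, h3, h4, h5, h6, Bool.false_eq_true, if_false, if_true,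
      Option.map_some, Option.map_none, Option.getD_some, Option.getD_none] <;>
    decide

set_option maxHeartbeats 1000000 in
theorem pvA_norm (raw : String) :
    categorize_findings raw =
      pvNorm ((PySem.Str.splitlines (PySem.Str.strip raw)).filter
        (fun ln => !(PySem.Str.strip ln == ""))) := by
  unfold categorize_findings pvNorm
  set lines0 := PySem.Str.splitlines (PySem.Str.strip raw) with hl
  set lines := lines0.filter (fun ln => !(PySem.Str.strip ln == "")) with hf
  have hstep : lines0.foldl pvStepA pvInitDict =
      lines.foldl (fun d ln => d.modify (pvClassify ln) [] (· ++ [ln])) pvInitDict := by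
    rw [show pvStepA = fun d ln =>
        if !(PySem.Str.strip ln == "") then d.modify (pvClassify ln) [] (· ++ [ln]) else d
      from funext fun d => funext fun ln => pvStepA_eq d ln]
    exact PySem.List.foldl_if_eq_foldl_filter
      (p := fun ln => !(PySem.Str.strip ln == ""))
      (f := fun d ln => d.modify (pvClassify ln) [] (· ++ [ln])) (l := lines0) pvInitDict
  have htag : lines.foldl (fun d ln => d.modify (pvClassify ln) [] (· ++ [ln])) pvInitDict =
      (lines.map (fun ln => (pvClassify ln, ln))).foldl
        (fun d p => d.modify p.1 [] (· ++ [p.2])) pvInitDict := by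
    rw [List.foldl_map]
  rw [hstep, htag]
  have hkeys : ((lines.map (fun ln => (pvClassify ln, ln))).foldl
      (fun d p => d.modify p.1 [] (· ++ [p.2])) pvInitDict).keys = pvInitDict.keys := by
    rw [show (fun (d : PySem.Dict String (List String)) (p : String × String) =>
          d.modify p.1 [] (· ++ [p.2])) = fun d p => d.modify ((·.1) p) [] ((fun (q : String × String) (l : List String) => l ++ [q.2]) p)
        from rfl]
    rw [PySem.Dict.keys_foldl_modify_key]
    rw [PySem.Set.update_eq_append_filter]
    have : (PySem.Set.ofList ((lines.map (fun ln => (pvClassify ln, ln))).map (·.1))).filter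
        (fun y => !(PySem.Set.contains pvInitDict.keys y)) = [] := by
      apply List.filter_eq_nil_iff.mpr
      intro k hk
      rw [PySem.Set.mem_ofList] at hk
      simp only [List.map_map, List.mem_map, Function.comp] at hk
      obtain ⟨ln, -, rfl⟩ := hk
      simp [PySem.Set.contains_eq_listContains, pvClassify_mem ln]
    rw [this, List.append_nil]
  have hnodup' : ((lines.map (fun ln => (pvClassify ln, ln))).foldl
      (fun d p => d.modify p.1 [] (· ++ [p.2])) pvInitDict).keys.Nodup := by
    rw [hkeys]; decide
  rw [PySem.Dict.items_eq_map_keys _ hnodup' ([] : List String), hkeys]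
  have hk7 : pvInitDict.keys = pvRules.map (·.2) ++ ["other"] := by decide
  rw [hk7]
  apply List.map_congr_left
  intro k hk
  rw [PySem.Dict.getD_foldl_modify_append]
  have hinit : pvInitDict.getD k [] = [] := by
    simp only [pvRules, List.map, List.mem_append, List.mem_cons, List.not_mem_nil,
      or_false] at hk
    rcases hk with (h | h | h | h | h | h) | h <;> subst h <;> decide
  rw [hinit, List.nil_append]
  rw [List.filter_map, List.map_map]
  simp only [Function.comp_def]
  simp

set_option maxHeartbeats 1000000 in
theorem pvB_norm (raw : String) :
    categorize_findings_alt raw =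
      pvNorm ((PySem.Str.splitlines (PySem.Str.strip raw)).filter
        (fun ln => !(PySem.Str.strip ln == ""))) := by
  unfold categorize_findings_alt pvNorm
  set lines := (PySem.Str.splitlines (PySem.Str.strip raw)).filter
    (fun ln => !(PySem.Str.strip ln == "")) with hf
  simp only [pvRules, List.foldl, pvSieve, List.filter_filter, List.map]
  simp [PySem.Dict.items_insert_of_not_contains, PySem.Dict.contains_insert, PySem.Dict.empty]
  refine ⟨?_, ?_, ?_, ?_, ?_, ?_, ?_⟩ <;>
  · apply List.filter_congr
    intro a _
    by_cases h1 : PySem.Chars.isIn ['u','n','u','s','e','d',' ','i','m','p','o','r','t'] (PySem.Chars.lower a.toList) <;>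
    by_cases h2 : PySem.Chars.isIn ['u','n','u','s','e','d',' ','f','u','n','c','t','i','o','n'] (PySem.Chars.lower a.toList) <;>
    by_cases h3 : PySem.Chars.isIn ['u','n','u','s','e','d',' ','v','a','r','i','a','b','l','e'] (PySem.Chars.lower a.toList) <;>
    by_cases h4 : PySem.Chars.isIn ['u','n','u','s','e','d',' ','c','l','a','s','s'] (PySem.Chars.lower a.toList) <;>
    by_cases h5 : PySem.Chars.isIn ['u','n','u','s','e','d',' ','a','t','t','r','i','b','u','t','e'] (PySem.Chars.lower a.toList) <;>
    by_cases h6 : PySem.Chars.isIn ['u','n','u','s','e','d',' ','p','r','o','p','e','r','t','y'] (PySem.Chars.lower a.toList) <;>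
    simp [pvClassify, pvRules, List.find?, h1, h2, h3, h4, h5, h6]

-- ===== VERDICT (by name: the statement is the Claim_ definition above) =====
theorem categorize_findings_spec : Claim_equal_categorize_findings := by
  intro raw _
  unfold Spec_categorize_findings
  rw [pvA_norm, pvB_norm]
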